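-- pv_equiv track=rewrite | github.com/allie-walker/Natural-product-function | processAntismash6Output.py | makeCountsandList
-- ===== SOURCE A (Python) =====
-- def makeCountsandList(feature_dir):
--     feature_list = []
--     feature_total_counts = {}
--     for c in feature_dir:
--         for f in feature_dir[c]:
--             if f not in feature_total_counts:
--                 feature_list.append(f)
--                 feature_total_counts[f] = 0
--             feature_total_counts[f] += feature_dir[c][f]
--     return (feature_list, feature_total_counts)
-- ===== SOURCE B (Python) =====
-- def makeCountsandList(feature_dir):
--     pairs = [(f, feature_dir[c][f]) for c in feature_dir for f in feature_dir[c]]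
--     feature_list = list(dict.fromkeys(f for f, _ in pairs))
--     feature_total_counts = {f: sum(v for g, v in pairs if g == f) for f in feature_list}
--     return (feature_list, feature_total_counts)
-- ===== Notes on version B (the rewrite author's own statement) =====
-- stated objective: alternative
-- what changed: B is a staged group-by: it flattens all inner dicts into one (feature, value) pair list, dedupes the keys in first-seen order, then computes each key's total by a per-key filter-and-sum over the pair list; it trades A's single incremental O(n) pass (feature list and running-count dict maintained together under a membership guard) for clearly separated stages at O(n*k) cost.
import Mathlib
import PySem

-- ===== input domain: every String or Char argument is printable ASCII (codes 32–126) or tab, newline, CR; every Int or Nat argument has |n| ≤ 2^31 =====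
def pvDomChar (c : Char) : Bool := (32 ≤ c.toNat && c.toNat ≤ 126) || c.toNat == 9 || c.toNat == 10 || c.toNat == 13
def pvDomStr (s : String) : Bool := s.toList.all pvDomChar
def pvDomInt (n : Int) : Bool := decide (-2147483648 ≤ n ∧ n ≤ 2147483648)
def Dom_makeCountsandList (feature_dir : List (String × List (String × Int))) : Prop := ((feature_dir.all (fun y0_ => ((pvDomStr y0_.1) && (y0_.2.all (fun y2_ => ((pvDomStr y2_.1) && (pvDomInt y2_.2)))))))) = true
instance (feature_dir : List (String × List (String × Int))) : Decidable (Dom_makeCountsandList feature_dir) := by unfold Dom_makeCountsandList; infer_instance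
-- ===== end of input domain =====

-- B replaces A's single incremental pass (feature list + running-count dict maintained together)
-- by a staged group-by: flatten to one pair list, dedup keys first-seen, then per-key filter-and-sum (objective: alternative).


-- ===== PORT A =====
-- for c in feature_dir: for f in feature_dir[c]: membership guard, append to list, init 0, then += ; dicts as PySem.Dict
def makeCountsandList (feature_dir : List (String × List (String × Int))) : List String × (List (String × Int)) :=
  let st := feature_dir.foldl (fun st c =>
    c.2.foldl (fun (st : List String × PySem.Dict String Int) f =>
      let st := if st.2.contains f.1 then st else (st.1 ++ [f.1], st.2.insert f.1 0)
      (st.1, st.2.insert f.1 (st.2.getD f.1 0 + f.2))) st) ([], PySem.Dict.empty)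
  (st.1, st.2.items)

-- ===== PORT B =====
-- staged group-by: flatten all inner dicts to one pair list; feature_list = list(dict.fromkeys(keys))
-- (ordered dedup = PySem.List.dedup); counts = {f: sum of matching values} per distinct key
def makeCountsandList_alt (feature_dir : List (String × List (String × Int))) : List String × (List (String × Int)) :=
  let pairs := feature_dir.flatMap (fun c => c.2)
  let feature_list := PySem.List.dedup (pairs.map (fun p => p.1))
  (feature_list,
   feature_list.map (fun f => (f, ((pairs.filter (fun p => p.1 == f)).map (fun p => p.2)).sum)))

-- ===== PRECONDITION & SPEC =====
def Spec_makeCountsandList (feature_dir : List (String × List (String × Int))) (out : List String × (List (String × Int))) : Prop := out = makeCountsandList_alt feature_dir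
instance (feature_dir : List (String × List (String × Int))) (out : List String × (List (String × Int))) : Decidable (Spec_makeCountsandList feature_dir out) := by unfold Spec_makeCountsandList; infer_instance

-- ===== CLAIM (what is proved, stated in full; the proofs are below) =====
def Claim_equal_makeCountsandList : Prop := ∀ (feature_dir : List (String × List (String × Int))), Dom_makeCountsandList feature_dir → Spec_makeCountsandList feature_dir (makeCountsandList feature_dir)

-- ===== LEMMAS AND PROOFS =====

-- A's per-feature step, starting from the invariant state (d.keys, d), lands on the
-- invariant state of the plain insert-accumulate step.
theorem pv_step_eq (d : PySem.Dict String Int) (f : String × Int) :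
    (let st := if d.contains f.1 then (d.keys, d) else (d.keys ++ [f.1], d.insert f.1 0)
     ((st.1, st.2.insert f.1 (st.2.getD f.1 0 + f.2)) : List String × PySem.Dict String Int))
    = ((d.insert f.1 (d.getD f.1 0 + f.2)).keys, d.insert f.1 (d.getD f.1 0 + f.2)) := by
  by_cases h : d.contains f.1
  · simp [h]
    exact (PySem.Dict.keys_insert_of_contains d _ h).symm
  · have h' : d.contains f.1 = false := by simpa using h
    simp [h', PySem.Dict.getD_insert_self, PySem.Dict.insert_insert_self,
      PySem.Dict.getD_of_not_contains d 0 h']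
    exact (PySem.Dict.keys_insert_of_not_contains d _ h').symm

theorem pv_inner (l : List (String × Int)) (d : PySem.Dict String Int) :
    l.foldl (fun (st : List String × PySem.Dict String Int) f =>
      let st := if st.2.contains f.1 then st else (st.1 ++ [f.1], st.2.insert f.1 0)
      (st.1, st.2.insert f.1 (st.2.getD f.1 0 + f.2))) (d.keys, d)
    = ((l.foldl (fun (d : PySem.Dict String Int) f => d.insert f.1 (d.getD f.1 0 + f.2)) d).keys,
       l.foldl (fun (d : PySem.Dict String Int) f => d.insert f.1 (d.getD f.1 0 + f.2)) d) := by
  induction l generalizing d with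
  | nil => rfl
  | cons f l ih =>
    simp only [List.foldl_cons]
    rw [show ((if d.contains f.1 then (d.keys, d) else (d.keys ++ [f.1], d.insert f.1 0)).1,
         (if d.contains f.1 then (d.keys, d) else (d.keys ++ [f.1], d.insert f.1 0)).2.insert f.1
           ((if d.contains f.1 then (d.keys, d) else (d.keys ++ [f.1], d.insert f.1 0)).2.getD f.1 0 + f.2))
        = ((d.insert f.1 (d.getD f.1 0 + f.2)).keys, d.insert f.1 (d.getD f.1 0 + f.2)) from pv_step_eq d f]
    exact ih _

theorem pv_outer (l : List (String × List (String × Int))) (d : PySem.Dict String Int) :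
    l.foldl (fun st c =>
      c.2.foldl (fun (st : List String × PySem.Dict String Int) f =>
        let st := if st.2.contains f.1 then st else (st.1 ++ [f.1], st.2.insert f.1 0)
        (st.1, st.2.insert f.1 (st.2.getD f.1 0 + f.2))) st) (d.keys, d)
    = ((l.foldl (fun d c =>
          c.2.foldl (fun (d : PySem.Dict String Int) f => d.insert f.1 (d.getD f.1 0 + f.2)) d) d).keys,
       l.foldl (fun d c =>
          c.2.foldl (fun (d : PySem.Dict String Int) f => d.insert f.1 (d.getD f.1 0 + f.2)) d) d) := by
  induction l generalizing d with
  | nil => rfl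
  | cons c l ih =>
    simp only [List.foldl_cons]
    rw [pv_inner c.2 d]
    exact ih _

-- the nested insert-accumulate fold is the fold over the flattened pair list
theorem pv_flat (l : List (String × List (String × Int))) (d : PySem.Dict String Int) :
    l.foldl (fun d c =>
      c.2.foldl (fun (d : PySem.Dict String Int) f => d.insert f.1 (d.getD f.1 0 + f.2)) d) d
    = (l.flatMap (fun c => c.2)).foldl
        (fun (d : PySem.Dict String Int) f => d.insert f.1 (d.getD f.1 0 + f.2)) d := by
  induction l generalizing d with
  | nil => rfl
  | cons c l ih => simp [List.foldl_append, ih]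

-- the accumulated count at key k is the group-by sum
theorem pv_getD_foldl (l : List (String × Int)) (d : PySem.Dict String Int) (k : String) :
    (l.foldl (fun (d : PySem.Dict String Int) f => d.insert f.1 (d.getD f.1 0 + f.2)) d).getD k 0
      = d.getD k 0 + ((l.filter (fun p => p.1 == k)).map (fun p => p.2)).sum := by
  induction l generalizing d with
  | nil => simp
  | cons p l ih =>
    simp only [List.foldl_cons, ih, List.filter_cons]
    by_cases h : p.1 = k
    · subst h
      simp [PySem.Dict.getD_insert_self]
      ring
    · simp [PySem.Dict.getD_insert, Ne.symm h, h]

-- ===== VERDICT (by name: the statement is the Claim_ definition above) =====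
theorem makeCountsandList_spec : Claim_equal_makeCountsandList := by
  intro fd _
  show makeCountsandList fd = makeCountsandList_alt fd
  unfold makeCountsandList makeCountsandList_alt
  have h := pv_outer fd PySem.Dict.empty
  simp only [PySem.Dict.keys_empty] at h
  rw [h, pv_flat]
  dsimp only
  set pairs := fd.flatMap (fun c => c.2) with hp
  set D := pairs.foldl (fun (d : PySem.Dict String Int) f => d.insert f.1 (d.getD f.1 0 + f.2))
    PySem.Dict.empty with hD
  have hkeys : D.keys = PySem.List.dedup (pairs.map (fun p => p.1)) := by
    rw [hD, PySem.Dict.keys_foldl_insert_key]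
    simp [PySem.Dict.keys_empty, PySem.Set.update, PySem.Set.ofList_eq_foldl]
  have hnd : D.keys.Nodup := by
    rw [hD]
    exact PySem.Dict.nodup_keys_foldl_insert_key pairs (fun p => p.1) _ _ PySem.Dict.nodup_keys_empty
  have hitems : D.items = D.keys.map (fun k => (k, D.getD k 0)) :=
    PySem.Dict.items_eq_map_keys D hnd 0
  rw [hitems, hkeys]
  refine congrArg _ (List.map_congr_left fun k _ => ?_)
  rw [hD, pv_getD_foldl]
  simp [PySem.Dict.getD_empty]
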